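-- pv_equiv track=rewrite | github.com/rygold523/compliance_manager | backend/app/api/control_readiness.py | build_evidence_index
-- ===== SOURCE A (Python) =====
-- from collections import defaultdict
--
-- def normalize_bool(value):
--     if value is True:
--         return True
--
--     if isinstance(value, str) and value.lower() in ["true", "yes", "1"]:
--         return True
--
--     return False
--
-- def latest_by_key(rows, key_fields):
--     latest = {}
--
--     for row in rows:
--         key = tuple(row.get(field) for field in key_fields)
--         ts = row.get("created_at") or row.get("updated_at") or row.get("collected_at") or ""
--
--         if key not in latest:
--             latest[key] = row
--             continue
--
--         old_ts = latest[key].get("created_at") or latest[key].get("updated_at") or latest[key].get("collected_at") or ""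
--         if ts > old_ts:
--             latest[key] = row
--
--     return latest
--
-- def build_evidence_index(evidence):
--     validated_controls = defaultdict(list)
--     latest_evidence = latest_by_key(evidence, ["asset_id", "collector"])
--
--     for ev in latest_evidence.values():
--         if not normalize_bool(ev.get("validated")):
--             continue
--
--         control_id = ev.get("control_id")
--         if not control_id:
--             continue
--
--         validated_controls[control_id].append({
--             "evidence_id": ev.get("evidence_id"),
--             "asset_id": ev.get("asset_id"),
--             "collector": ev.get("collector"),
--             "created_at": ev.get("created_at"),
--         })
--
--     return validated_controls
-- ===== SOURCE B (Python) =====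
-- def normalize_bool(value):
--     if value is True:
--         return True
--     if isinstance(value, str) and value.lower() in ["true", "yes", "1"]:
--         return True
--     return False
--
-- def build_evidence_index(evidence):
--     # Three staged passes instead of A's incremental compare-and-overwrite dict:
--     # 1) per-key maximum timestamp; 2) per-key first row attaining that maximum;
--     # 3) build the validated index walking the keys in first-occurrence order.
--     def ts(r):
--         return next((r[f] for f in ("created_at", "updated_at", "collected_at") if r.get(f)), "")
--
--     def key(r):
--         return (r.get("asset_id"), r.get("collector"))
--
--     best = {}
--     for r in evidence:
--         k, t = key(r), ts(r)
--         best[k] = max(best.get(k, t), t)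
--
--     winner = {}
--     for r in evidence:
--         k = key(r)
--         if k not in winner and ts(r) == best[k]:
--             winner[k] = r
--
--     index = {}
--     for k in best:
--         e = winner[k]
--         cid = e.get("control_id", "")
--         if normalize_bool(e.get("validated")) and cid:
--             index.setdefault(cid, []).append(
--                 {f: e.get(f) for f in ("evidence_id", "asset_id", "collector", "created_at")})
--     return index
-- ===== Notes on version B (the rewrite author's own statement) =====
-- stated objective: alternative
-- what changed: latest_by_key's incremental track-current-latest dict is replaced by three staged passes (per-key maximum timestamp via max, then per-key first row attaining that maximum, then the validated index built with setdefault walking keys in first-occurrence order); Pre_ excludes only inputs whose returned dict would contain Python None for a missing copied field, which is not a value of the declared str type (B returns the identical None-bearing dict there).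
import Mathlib
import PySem

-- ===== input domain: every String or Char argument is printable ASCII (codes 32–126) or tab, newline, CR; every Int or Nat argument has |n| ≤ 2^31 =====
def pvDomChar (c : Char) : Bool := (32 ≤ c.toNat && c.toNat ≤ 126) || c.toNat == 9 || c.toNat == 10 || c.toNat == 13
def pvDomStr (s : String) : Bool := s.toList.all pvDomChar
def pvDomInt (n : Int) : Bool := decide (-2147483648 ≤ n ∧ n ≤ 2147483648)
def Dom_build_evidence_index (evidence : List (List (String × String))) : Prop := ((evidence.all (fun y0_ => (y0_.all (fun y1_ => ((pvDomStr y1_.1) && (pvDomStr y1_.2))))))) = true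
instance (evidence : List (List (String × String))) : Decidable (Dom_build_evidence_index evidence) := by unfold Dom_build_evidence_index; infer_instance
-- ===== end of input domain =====

-- B replaces latest_by_key's incremental compare-and-overwrite dict with three staged passes
-- (per-key max timestamp, per-key first row attaining it, then the index walk); alternative structure, same cost.
-- Return-value equivalence only; neither program mutates its argument.


abbrev pvRow := List (String × String)
abbrev pvK := Option String × Option String

-- ===== PORT A =====
-- row.get("created_at") or row.get("updated_at") or row.get("collected_at") or "", as A writes it
-- inline; exact via .getD "": None and "" are both falsy, fall through alike, and the chain ends in ""
def pvTsA (row : pvRow) : String :=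
  let c := ((PySem.Dict.mk row).get? "created_at").getD ""
  if c != "" then c
  else
    let u := ((PySem.Dict.mk row).get? "updated_at").getD ""
    if u != "" then u
    else ((PySem.Dict.mk row).get? "collected_at").getD ""

-- tuple(row.get(f) for f in ["asset_id", "collector"]) (latest_by_key specialized to A's call)
def pvKeyOf (row : pvRow) : pvK :=
  ((PySem.Dict.mk row).get? "asset_id", (PySem.Dict.mk row).get? "collector")

-- normalize_bool on a str-or-None value (the `value is True` branch can never fire here)
def normalize_bool (value : Option String) : Bool :=
  match value with
  | none => false
  | some s => ["true", "yes", "1"].contains (PySem.Str.lower s)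

-- the literal dict appended for a validated row; .getD "" is exact on Pre_ (the four keys are present)
def pvOutRow (ev : pvRow) : pvRow :=
  [("evidence_id", ((PySem.Dict.mk ev).get? "evidence_id").getD ""),
   ("asset_id", ((PySem.Dict.mk ev).get? "asset_id").getD ""),
   ("collector", ((PySem.Dict.mk ev).get? "collector").getD ""),
   ("created_at", ((PySem.Dict.mk ev).get? "created_at").getD "")]

-- body of latest_by_key's loop: keep first on ties, overwrite on strictly greater ts
def pvLatestStep (latest : PySem.Dict pvK pvRow) (row : pvRow) : PySem.Dict pvK pvRow :=
  match latest.get? (pvKeyOf row) with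
  | none => latest.insert (pvKeyOf row) row
  | some old => if pvTsA old < pvTsA row then latest.insert (pvKeyOf row) row else latest

def latest_by_key (rows : List pvRow) : PySem.Dict pvK pvRow :=
  rows.foldl pvLatestStep PySem.Dict.empty

-- body of A's indexing loop (defaultdict(list) append = modify with default [])
def pvIndexStep (d : PySem.Dict String (List pvRow)) (ev : pvRow) : PySem.Dict String (List pvRow) :=
  if !normalize_bool ((PySem.Dict.mk ev).get? "validated") then d
  else
    match (PySem.Dict.mk ev).get? "control_id" with
    | none => d
    | some cid => if cid = "" then d else d.modify cid [] (· ++ [pvOutRow ev])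

def build_evidence_index (evidence : List (List (String × String))) : List (String × List (List (String × String))) :=
  ((latest_by_key evidence).values.foldl pvIndexStep PySem.Dict.empty).items

-- ===== PORT B =====
-- ts(r) = next((r[f] for f in fields if r.get(f)), ""): first field whose value is truthy
def pvFirstTruthy (r : pvRow) : List String → String
  | [] => ""
  | f :: rest =>
    match (PySem.Dict.mk r).get? f with
    | some s => if s ≠ "" then s else pvFirstTruthy r rest
    | none => pvFirstTruthy r rest

def pvTsAlt (r : pvRow) : String :=
  pvFirstTruthy r ["created_at", "updated_at", "collected_at"]

-- pass 1: best[k] = max(best.get(k, ts(r)), ts(r)); Python max(x, y) returns x on a tie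
def pvMax2 (x y : String) : String := if x < y then y else x

def pvBestStep (best : PySem.Dict pvK String) (r : pvRow) : PySem.Dict pvK String :=
  let k := pvKeyOf r
  let t := pvTsAlt r
  best.insert k (pvMax2 (best.getD k t) t)

-- pass 2: if key(r) not in winner and ts(r) == best[key(r)]: winner[key(r)] = r
-- (best[k] cannot raise KeyError: pass 1 inserted every key; the none branch is unreachable)
def pvWinStep (best : PySem.Dict pvK String) (winner : PySem.Dict pvK pvRow) (r : pvRow) : PySem.Dict pvK pvRow :=
  let k := pvKeyOf r
  if !winner.contains k && some (pvTsAlt r) == best.get? k then winner.insert k r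
  else winner

-- {f: ev.get(f) for f in (...)}: the appended row as a comprehension; .getD "" exact on Pre_
def pvOutRowAlt (e : pvRow) : pvRow :=
  ["evidence_id", "asset_id", "collector", "created_at"].map
    (fun f => (f, (PySem.Dict.mk e).getD f ""))

-- pass 3 body, for one key k of best: ev = winner[k] (present by construction; none unreachable),
-- then the `and`-truthiness test on ev.get("control_id", "") and the setdefault-append
def pvBuildStep (winner : PySem.Dict pvK pvRow) (idx : PySem.Dict String (List pvRow)) (k : pvK) :
    PySem.Dict String (List pvRow) :=
  (winner.get? k).elim idx (fun e =>
    let cid := (PySem.Dict.mk e).getD "control_id" ""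
    if normalize_bool ((PySem.Dict.mk e).get? "validated") && cid != "" then
      idx.modify cid [] (· ++ [pvOutRowAlt e])
    else idx)

def build_evidence_index_alt (evidence : List (List (String × String))) : List (String × List (List (String × String))) :=
  let best := evidence.foldl pvBestStep PySem.Dict.empty
  let winner := evidence.foldl (pvWinStep best) PySem.Dict.empty
  (best.keys.foldl (pvBuildStep winner) PySem.Dict.empty).items

-- ===== PRECONDITION & SPEC =====
-- Pre_ excludes inputs on which some key's winning row has a truthy "validated" and a non-empty
-- "control_id" but lacks one of the four copied fields: there the Python A RETURNS a dict whose
-- inner values contain Python None, which is not a value of the declared str type (inner dicts are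
-- str -> str under the type convention), so no Lean value of the declared return type represents
-- A's result; B returns the same un-representable dict there.
def pvPreRow (row : List (String × String)) : Bool :=
  let d := PySem.Dict.mk row
  let truthy :=
    (match d.get? "validated" with
     | none => false
     | some s => ["true", "yes", "1"].contains (PySem.Str.lower s)) &&
    (match d.get? "control_id" with
     | none => false
     | some c => !(c == ""))
  !truthy || (d.contains "evidence_id" && d.contains "asset_id" &&
              d.contains "collector" && d.contains "created_at")

def Pre_build_evidence_index (evidence : List (List (String × String))) : Prop :=
  evidence.all pvPreRow = true
instance (evidence : List (List (String × String))) : Decidable (Pre_build_evidence_index evidence) := by unfold Pre_build_evidence_index; infer_instance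

def pvWitness_build_evidence_index : (List (List (String × String))) :=
  [[("asset_id", "a"), ("collector", "c"), ("validated", "true"), ("control_id", "c1"),
    ("evidence_id", "e1"), ("created_at", "2024-01-01")],
   [("asset_id", "a"), ("collector", "c"), ("created_at", "2023-01-01")]]

def Spec_build_evidence_index (evidence : List (List (String × String))) (out : List (String × List (List (String × String)))) : Prop := out = build_evidence_index_alt evidence
instance (evidence : List (List (String × String))) (out : List (String × List (List (String × String)))) : Decidable (Spec_build_evidence_index evidence out) := by unfold Spec_build_evidence_index; infer_instance

-- ===== CLAIM (what is proved, stated in full; the proofs are below) =====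
def Claim_equal_build_evidence_index : Prop := ∀ (evidence : List (List (String × String))), Dom_build_evidence_index evidence → Pre_build_evidence_index evidence → Spec_build_evidence_index evidence (build_evidence_index evidence)

-- ===== LEMMAS AND PROOFS =====

-- B's generator expression computes A's or-chain
theorem pvTsAlt_eq (r : pvRow) : pvTsAlt r = pvTsA r := by
  unfold pvTsAlt pvTsA
  simp only [pvFirstTruthy]
  cases (PySem.Dict.mk r).get? "created_at" <;>
    cases (PySem.Dict.mk r).get? "updated_at" <;>
      cases (PySem.Dict.mk r).get? "collected_at" <;>
        simp <;> split_ifs <;> simp_all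

-- B's comprehension builds A's literal output row
theorem pvOutRowAlt_eq (ev : pvRow) : pvOutRowAlt ev = pvOutRow ev := rfl

-- invariant relating A's latest dict to B's pass-1 best dict
def pvRel1 (l : PySem.Dict pvK pvRow) (b : PySem.Dict pvK String) : Prop :=
  b.items = l.items.map (fun p => (p.1, pvTsA p.2)) ∧ l.keys.Nodup

theorem pvFind (l : List (pvK × pvRow)) (k : pvK) :
    List.find? (fun p => p.1 == k) (l.map (fun p => (p.1, pvTsA p.2))) =
      Option.map (fun p => ((p : pvK × pvRow).1, pvTsA p.2)) (List.find? (fun p => p.1 == k) l) := by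
  rw [List.find?_map]; rfl

theorem pvRel1_get? {l : PySem.Dict pvK pvRow} {b : PySem.Dict pvK String}
    (h : pvRel1 l b) (k : pvK) : b.get? k = (l.get? k).map pvTsA := by
  simp only [PySem.Dict.get?, h.1, pvFind, Option.map_map]; rfl

theorem pvRel1_step (l : PySem.Dict pvK pvRow) (b : PySem.Dict pvK String) (r : pvRow)
    (h : pvRel1 l b) : pvRel1 (pvLatestStep l r) (pvBestStep b r) := by
  obtain ⟨hi, hnd⟩ := h
  have hget := pvRel1_get? ⟨hi, hnd⟩ (pvKeyOf r)
  cases hl : l.get? (pvKeyOf r) with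
  | none =>
    have hbg : b.get? (pvKeyOf r) = none := by rw [hget, hl]; rfl
    have hlc : l.contains (pvKeyOf r) = false := by
      rw [PySem.Dict.contains_eq_isSome_get?, hl]; rfl
    have hbc : b.contains (pvKeyOf r) = false := by
      rw [PySem.Dict.contains_eq_isSome_get?, hbg]; rfl
    have hgd : b.getD (pvKeyOf r) (pvTsA r) = pvTsA r := PySem.Dict.getD_of_not_contains b (pvTsA r) hbc
    constructor
    · simp only [pvLatestStep, pvBestStep, hl, hgd, pvMax2, pvTsAlt_eq,
        PySem.Dict.items_insert_of_not_contains l r hlc,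
        PySem.Dict.items_insert_of_not_contains b _ hbc,
        lt_self_iff_false, if_false, List.map_append, hi, List.map_cons, List.map_nil]
    · have hkeys := PySem.Dict.keys_insert_of_not_contains l r hlc
      simp only [pvLatestStep, hl, PySem.Dict.keys] at *
      rw [hkeys]
      refine List.Nodup.append hnd (List.nodup_singleton _) ?_
      intro a ha hb'
      simp only [List.mem_singleton] at hb'
      subst hb'
      have : l.contains (pvKeyOf r) = true := by
        rw [PySem.Dict.contains_iff_mem_keys]; exact ha
      rw [hlc] at this; exact absurd this (by simp)
  | some w =>
    have hbg : b.get? (pvKeyOf r) = some (pvTsA w) := by rw [hget, hl]; rfl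
    have hlc : l.contains (pvKeyOf r) = true := by
      rw [PySem.Dict.contains_eq_isSome_get?, hl]; rfl
    have hbc : b.contains (pvKeyOf r) = true := by
      rw [PySem.Dict.contains_eq_isSome_get?, hbg]; rfl
    have hgd : b.getD (pvKeyOf r) (pvTsA r) = pvTsA w := PySem.Dict.getD_of_get?_eq_some b (pvTsA r) hbg
    have hnd' : (pvLatestStep l r).keys.Nodup := by
      unfold pvLatestStep
      simp only [hl]
      split_ifs with hc
      · rw [PySem.Dict.keys_insert_of_contains l r hlc]; exact hnd
      · exact hnd
    refine ⟨?_, hnd'⟩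
    unfold pvLatestStep pvBestStep pvMax2
    simp only [hl, pvTsAlt_eq]
    rw [hgd, PySem.Dict.items_insert_of_contains b _ hbc, hi, List.map_map]
    split_ifs with hc
    · rw [PySem.Dict.items_insert_of_contains l r hlc, List.map_map]
      refine List.map_congr_left ?_
      intro p hp
      by_cases hpk : (p.1 == pvKeyOf r) = true
      · simp only [Function.comp, hpk, if_true]
      · simp only [Function.comp, hpk]
        rw [if_neg (by simp), if_neg (by simp)]
    · refine List.map_congr_left ?_
      intro p hp
      by_cases hpk : (p.1 == pvKeyOf r) = true
      · have hpe : p.1 = pvKeyOf r := eq_of_beq hpk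
        have hgp : l.get? p.1 = some p.2 :=
          PySem.Dict.get?_of_mem_items l (by simp at hp ⊢; exact hp) hnd
        rw [hpe, hl] at hgp
        obtain rfl : w = p.2 := Option.some.inj hgp
        simp [Function.comp, hpe]
      · simp [Function.comp, hpk]

-- A's running dict only ever raises the ts at a key
theorem pvLatest_mono (rows : List pvRow) (d : PySem.Dict pvK pvRow) (k : pvK) (w : pvRow)
    (h : d.get? k = some w) :
    ∃ w', (rows.foldl pvLatestStep d).get? k = some w' ∧ pvTsA w ≤ pvTsA w' := by
  induction rows generalizing d w with
  | nil => exact ⟨w, h, le_refl _⟩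
  | cons r t ih =>
    have hstep : ∃ w1, (pvLatestStep d r).get? k = some w1 ∧ pvTsA w ≤ pvTsA w1 := by
      unfold pvLatestStep
      cases hd : d.get? (pvKeyOf r) with
      | none =>
        have hne : k ≠ pvKeyOf r := by intro he; rw [he, hd] at h; exact absurd h (by simp)
        exact ⟨w, by rw [PySem.Dict.get?_insert_of_ne d r hne]; exact h, le_refl _⟩
      | some old =>
        dsimp only
        by_cases hk : k = pvKeyOf r
        · subst hk
          rw [hd] at h
          obtain rfl := Option.some.inj h
          split_ifs with hlt
          · exact ⟨r, PySem.Dict.get?_insert_self d _ r, le_of_lt hlt⟩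
          · exact ⟨old, hd, le_refl _⟩
        · split_ifs with hlt
          · exact ⟨w, by rw [PySem.Dict.get?_insert_of_ne d r hk]; exact h, le_refl _⟩
          · exact ⟨w, h, le_refl _⟩
    obtain ⟨w1, hw1, hle⟩ := hstep
    obtain ⟨w', hw', hle'⟩ := ih (pvLatestStep d r) w1 hw1
    exact ⟨w', hw', le_trans hle hle'⟩

theorem pvRel1_foldl (rows : List pvRow) :
    pvRel1 (rows.foldl pvLatestStep PySem.Dict.empty) (rows.foldl pvBestStep PySem.Dict.empty) := by
  have h : ∀ (l : PySem.Dict pvK pvRow) (b : PySem.Dict pvK String), pvRel1 l b →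
      pvRel1 (rows.foldl pvLatestStep l) (rows.foldl pvBestStep b) := by
    induction rows with
    | nil => intro l b h; exact h
    | cons r t ih => intro l b h; exact ih _ _ (pvRel1_step l b r h)
  exact h _ _ ⟨rfl, by simp [PySem.Dict.empty, PySem.Dict.keys]⟩

-- every row's ts is bounded by the final value at its key
theorem pvLatest_bound (rows : List pvRow) (d : PySem.Dict pvK pvRow) (r : pvRow) (hr : r ∈ rows) :
    ∃ w, (rows.foldl pvLatestStep d).get? (pvKeyOf r) = some w ∧ pvTsA r ≤ pvTsA w := by
  induction rows generalizing d with
  | nil => cases hr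
  | cons x t ih =>
    rcases List.mem_cons.mp hr with rfl | hrt
    · have hstep : ∃ w1, (pvLatestStep d r).get? (pvKeyOf r) = some w1 ∧ pvTsA r ≤ pvTsA w1 := by
        unfold pvLatestStep
        cases hd : d.get? (pvKeyOf r) with
        | none => exact ⟨r, PySem.Dict.get?_insert_self d _ r, le_refl _⟩
        | some old =>
          dsimp only
          split_ifs with hlt
          · exact ⟨r, PySem.Dict.get?_insert_self d _ r, le_refl _⟩
          · exact ⟨old, hd, le_of_not_gt hlt⟩
      obtain ⟨w1, hw1, hle⟩ := hstep
      obtain ⟨w', hw', hle'⟩ := pvLatest_mono t (pvLatestStep d r) (pvKeyOf r) w1 hw1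
      exact ⟨w', by simpa using hw', le_trans hle hle'⟩
    · simpa using ih (pvLatestStep d x) hrt

-- invariant relating A's latest dict to B's pass-2 winner dict (bF = final best lookup)
def pvRel2 (bF : pvK → Option String) (l w : PySem.Dict pvK pvRow) : Prop :=
  ∀ k, (l.get? k = none ∧ w.get? k = none) ∨
    (∃ a, l.get? k = some a ∧ w.get? k = some a ∧ bF k = some (pvTsA a)) ∨
    (∃ a t, l.get? k = some a ∧ w.get? k = none ∧ bF k = some t ∧ pvTsA a < t)

theorem pvRel2_step (best : PySem.Dict pvK String) (l w : PySem.Dict pvK pvRow) (r : pvRow)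
    (hr : ∃ t, best.get? (pvKeyOf r) = some t ∧ pvTsA r ≤ t)
    (h : pvRel2 best.get? l w) : pvRel2 best.get? (pvLatestStep l r) (pvWinStep best w r) := by
  intro k
  by_cases hk : k = pvKeyOf r
  · subst hk
    obtain ⟨t0, hb0, hle⟩ := hr
    rcases h (pvKeyOf r) with ⟨h1, h2⟩ | ⟨a, h1, h2, h3⟩ | ⟨a, t, h1, h2, h3, h4⟩
    · -- neither dict has the key yet
      have hA : (pvLatestStep l r).get? (pvKeyOf r) = some r := by
        unfold pvLatestStep
        simp only [h1]
        exact PySem.Dict.get?_insert_self l _ r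
      have hc : w.contains (pvKeyOf r) = false := by
        rw [PySem.Dict.contains_eq_isSome_get?, h2]; rfl
      by_cases heq : pvTsA r = t0
      · have hB : (pvWinStep best w r).get? (pvKeyOf r) = some r := by
          unfold pvWinStep
          simp only [hb0, hc, pvTsAlt_eq, heq]
          rw [if_pos (by simp)]
          exact PySem.Dict.get?_insert_self w _ r
        exact Or.inr (Or.inl ⟨r, hA, hB, by rw [hb0, heq]⟩)
      · have hB : (pvWinStep best w r).get? (pvKeyOf r) = none := by
          unfold pvWinStep
          simp only [hb0, hc, pvTsAlt_eq]
          rw [if_neg (by simp [heq])]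
          exact h2
        exact Or.inr (Or.inr ⟨r, t0, hA, hB, hb0, lt_of_le_of_ne hle heq⟩)
    · -- both dicts hold the winner already; its ts is the key's maximum
      have ht0 : t0 = pvTsA a := by rw [hb0] at h3; exact Option.some.inj h3
      have hnlt : ¬ pvTsA a < pvTsA r := not_lt_of_ge (ht0 ▸ hle)
      have hA : (pvLatestStep l r).get? (pvKeyOf r) = some a := by
        unfold pvLatestStep
        simp only [h1]
        rw [if_neg hnlt]
        exact h1
      have hc : w.contains (pvKeyOf r) = true := by
        rw [PySem.Dict.contains_eq_isSome_get?, h2]; rfl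
      have hB : (pvWinStep best w r).get? (pvKeyOf r) = some a := by
        unfold pvWinStep
        simp only [hc]
        rw [if_neg (by simp)]
        exact h2
      exact Or.inr (Or.inl ⟨a, hA, hB, h3⟩)
    · -- A holds a provisional row whose ts is below the key's maximum; B holds nothing yet
      obtain rfl : t0 = t := by rw [hb0] at h3; exact Option.some.inj h3
      have hc : w.contains (pvKeyOf r) = false := by
        rw [PySem.Dict.contains_eq_isSome_get?, h2]; rfl
      by_cases heq : pvTsA r = t0
      · have hlt : pvTsA a < pvTsA r := heq ▸ h4
        have hA : (pvLatestStep l r).get? (pvKeyOf r) = some r := by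
          unfold pvLatestStep
          simp only [h1]
          rw [if_pos hlt]
          exact PySem.Dict.get?_insert_self l _ r
        have hB : (pvWinStep best w r).get? (pvKeyOf r) = some r := by
          unfold pvWinStep
          simp only [hb0, hc, pvTsAlt_eq, heq]
          rw [if_pos (by simp)]
          exact PySem.Dict.get?_insert_self w _ r
        exact Or.inr (Or.inl ⟨r, hA, hB, by rw [hb0, heq]⟩)
      · have hB : (pvWinStep best w r).get? (pvKeyOf r) = none := by
          unfold pvWinStep
          simp only [hb0, hc, pvTsAlt_eq]
          rw [if_neg (by simp [heq])]
          exact h2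
        by_cases hlt : pvTsA a < pvTsA r
        · have hA : (pvLatestStep l r).get? (pvKeyOf r) = some r := by
            unfold pvLatestStep
            simp only [h1]
            rw [if_pos hlt]
            exact PySem.Dict.get?_insert_self l _ r
          exact Or.inr (Or.inr ⟨r, t0, hA, hB, hb0, lt_of_le_of_ne hle heq⟩)
        · have hA : (pvLatestStep l r).get? (pvKeyOf r) = some a := by
            unfold pvLatestStep
            simp only [h1]
            rw [if_neg hlt]
            exact h1
          exact Or.inr (Or.inr ⟨a, t0, hA, hB, hb0, h4⟩)
  · have hA : (pvLatestStep l r).get? k = l.get? k := by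
      unfold pvLatestStep
      cases hd : l.get? (pvKeyOf r) with
      | none => exact PySem.Dict.get?_insert_of_ne l r hk
      | some old =>
        dsimp only
        split_ifs with hlt
        · exact PySem.Dict.get?_insert_of_ne l r hk
        · rfl
    have hB : (pvWinStep best w r).get? k = w.get? k := by
      unfold pvWinStep
      dsimp only
      split_ifs with hc
      · exact PySem.Dict.get?_insert_of_ne w r hk
      · rfl
    rw [hA, hB]; exact h k

theorem pvRel2_foldl (rows : List pvRow) (best : PySem.Dict pvK String)
    (hb : ∀ r ∈ rows, ∃ t, best.get? (pvKeyOf r) = some t ∧ pvTsA r ≤ t) :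
    pvRel2 best.get? (rows.foldl pvLatestStep PySem.Dict.empty)
      (rows.foldl (pvWinStep best) PySem.Dict.empty) := by
  have main : ∀ (rows' : List pvRow) (l w : PySem.Dict pvK pvRow),
      (∀ r ∈ rows', ∃ t, best.get? (pvKeyOf r) = some t ∧ pvTsA r ≤ t) →
      pvRel2 best.get? l w →
      pvRel2 best.get? (rows'.foldl pvLatestStep l) (rows'.foldl (pvWinStep best) w) := by
    intro rows'
    induction rows' with
    | nil => intro l w _ h; exact h
    | cons r t ih =>
      intro l w hb' h
      exact ih _ _ (fun x hx => hb' x (List.mem_cons_of_mem _ hx))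
        (pvRel2_step best l w r (hb' r List.mem_cons_self) h)
  exact main rows _ _ hb
    (fun k => Or.inl ⟨PySem.Dict.get?_empty k, PySem.Dict.get?_empty k⟩)

-- pointwise equality of the two pass-3 bodies on a stored item
theorem pvBuildStep_eq (winner : PySem.Dict pvK pvRow) (d : PySem.Dict String (List pvRow))
    (k : pvK) (ev : pvRow) (h : winner.get? k = some ev) :
    pvBuildStep winner d k = pvIndexStep d ev := by
  unfold pvBuildStep pvIndexStep
  simp only [h]
  cases hb : normalize_bool ((PySem.Dict.mk ev).get? "validated")
  · simp [hb]
  · cases hc : (PySem.Dict.mk ev).get? "control_id" with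
    | none =>
      have hgd : (PySem.Dict.mk ev).getD "control_id" "" = "" := by
        rw [PySem.Dict.getD_eq_get?_getD, hc]; rfl
      simp [hb, hgd]
    | some cid =>
      have hgd : (PySem.Dict.mk ev).getD "control_id" "" = cid := by
        rw [PySem.Dict.getD_eq_get?_getD, hc]; rfl
      by_cases hcid : cid = "" <;> simp [hb, hgd, hcid, pvOutRowAlt_eq]

-- ===== VERDICT (by name: the statement is the Claim_ definition above) =====
theorem build_evidence_index_spec : Claim_equal_build_evidence_index := by
  intro evidence _ _
  unfold Spec_build_evidence_index build_evidence_index build_evidence_index_alt latest_by_key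
  dsimp only
  have hrel1 := pvRel1_foldl evidence
  have hbg := pvRel1_get? hrel1
  have hb : ∀ r ∈ evidence, ∃ t,
      (evidence.foldl pvBestStep PySem.Dict.empty).get? (pvKeyOf r) = some t ∧ pvTsA r ≤ t := by
    intro r hrr
    obtain ⟨v, hv, hle⟩ := pvLatest_bound evidence PySem.Dict.empty r hrr
    exact ⟨pvTsA v, by rw [hbg, hv]; rfl, hle⟩
  have hrel2 := pvRel2_foldl evidence _ hb
  have hwl : ∀ k, (evidence.foldl (pvWinStep (evidence.foldl pvBestStep PySem.Dict.empty))
      PySem.Dict.empty).get? k = (evidence.foldl pvLatestStep PySem.Dict.empty).get? k := by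
    intro k
    rcases hrel2 k with ⟨h1, h2⟩ | ⟨a, h1, h2, h3⟩ | ⟨a, t, h1, h2, h3, h4⟩
    · rw [h1, h2]
    · rw [h1, h2]
    · exfalso
      rw [hbg, h1] at h3
      exact absurd ((Option.some.inj h3 : pvTsA a = t) ▸ h4) (lt_irrefl _)
  have hkeys : (evidence.foldl pvBestStep PySem.Dict.empty).keys =
      (evidence.foldl pvLatestStep PySem.Dict.empty).keys := by
    simp only [PySem.Dict.keys, hrel1.1, List.map_map]; rfl
  rw [hkeys]
  congr 1
  show ((evidence.foldl pvLatestStep PySem.Dict.empty).items.map Prod.snd).foldl pvIndexStep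
      PySem.Dict.empty =
    ((evidence.foldl pvLatestStep PySem.Dict.empty).items.map Prod.fst).foldl
      (pvBuildStep _) PySem.Dict.empty
  rw [List.foldl_map, List.foldl_map]
  refine PySem.List.foldl_congr_mem _ _ _ _ ?_
  intro acc p hp
  have hget : (evidence.foldl (pvWinStep (evidence.foldl pvBestStep PySem.Dict.empty))
      PySem.Dict.empty).get? p.1 = some p.2 := by
    rw [hwl]
    exact PySem.Dict.get?_of_mem_items _ (by simpa using hp) hrel1.2
  exact (pvBuildStep_eq _ acc p.1 p.2 hget).symm
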